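-- pv_equiv track=rewrite | github.com/do-androids-dream/Python | Sprint-2/2-1.py | double_string
-- ===== SOURCE A (Python) =====
-- def double_string(data):
--     counter = 0
--     st = set()
--     for i in data:
--         for j in data:
--             st.add(i + j)
--     for i in st:
--         for j in data:
--             if i == j: counter += 1
--     return counter
-- ===== SOURCE B (Python) =====
-- def double_string(data):
--     s = set(data)
--     return sum(1 for x in data if any(x - a in s for a in data))
-- ===== Notes on version B (the rewrite author's own statement) =====
-- stated objective: faster
-- what changed: Instead of materialising the full set of pairwise sums (up to n^2 elements) and counting occurrences of each sum in data, B builds a set of the data once and counts elements x with some a in data such that x-a is also in data.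
import Mathlib
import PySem

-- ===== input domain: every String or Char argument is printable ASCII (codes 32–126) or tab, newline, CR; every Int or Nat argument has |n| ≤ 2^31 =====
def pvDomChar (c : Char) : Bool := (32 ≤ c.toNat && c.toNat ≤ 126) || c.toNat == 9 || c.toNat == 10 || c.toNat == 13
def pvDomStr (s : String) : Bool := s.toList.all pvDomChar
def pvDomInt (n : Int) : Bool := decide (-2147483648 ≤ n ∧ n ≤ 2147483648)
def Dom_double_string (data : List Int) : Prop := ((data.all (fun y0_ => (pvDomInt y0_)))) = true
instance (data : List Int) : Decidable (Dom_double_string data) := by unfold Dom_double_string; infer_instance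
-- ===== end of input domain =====

-- B replaces A's materialised set of all pairwise sums (and its per-sum count loop) by one
-- set of the data and a split test per element; measurably faster (asymptotic).


-- ===== PORT A =====
def double_string (data : List Int) : Int :=
  let st : PySem.Set Int :=
    data.foldl (fun st i => data.foldl (fun st j => PySem.Set.add st (i + j)) st) PySem.Set.empty
  st.foldl (fun counter i =>
    data.foldl (fun counter j => if i = j then counter + 1 else counter) counter) 0

-- ===== PORT B =====
def double_string_alt (data : List Int) : Int :=
  let s : PySem.Set Int := PySem.Set.ofList data
  data.foldl (fun c x => if data.any (fun a => PySem.Set.contains s (x - a)) then c + 1 else c) 0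

-- ===== PRECONDITION & SPEC =====
def Spec_double_string (data : List Int) (out : Int) : Prop := out = double_string_alt data
instance (data : List Int) (out : Int) : Decidable (Spec_double_string data out) := by unfold Spec_double_string; infer_instance

-- ===== CLAIM (what is proved, stated in full; the proofs are below) =====
def Claim_equal_double_string : Prop := ∀ (data : List Int), Dom_double_string data → Spec_double_string data (double_string data)

-- ===== LEMMAS AND PROOFS =====

-- A's set of pairwise sums, as the fold A's port builds
def pvSumset (data : List Int) : PySem.Set Int :=
  data.foldl (fun st i => data.foldl (fun st j => PySem.Set.add st (i + j)) st) PySem.Set.empty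

-- membership in A's set of pairwise sums
theorem pv_mem_sumset (data l : List Int) (s : PySem.Set Int) (y : Int) :
    y ∈ l.foldl (fun st i => data.foldl (fun st j => PySem.Set.add st (i + j)) st) s ↔
      y ∈ s ∨ ∃ i ∈ l, ∃ j ∈ data, y = i + j := by
  induction l generalizing s with
  | nil => simp
  | cons a tl ih =>
    simp only [List.foldl_cons, ih, PySem.Set.mem_foldl_add]
    constructor
    · rintro ((h | ⟨j, hj, rfl⟩) | ⟨i, hi, j, hj, rfl⟩)
      · exact Or.inl h
      · exact Or.inr ⟨a, List.mem_cons_self .., j, hj, rfl⟩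
      · exact Or.inr ⟨i, List.mem_cons_of_mem _ hi, j, hj, rfl⟩
    · rintro (h | ⟨i, hi, j, hj, rfl⟩)
      · exact Or.inl (Or.inl h)
      · rcases List.mem_cons.1 hi with rfl | hi
        · exact Or.inl (Or.inr ⟨j, hj, rfl⟩)
        · exact Or.inr ⟨i, hi, j, hj, rfl⟩

theorem pv_nodup_sumset (data l : List Int) (s : PySem.Set Int) (hs : s.Nodup) :
    (l.foldl (fun st i => data.foldl (fun st j => PySem.Set.add st (i + j)) st) s).Nodup := by
  induction l generalizing s with
  | nil => exact hs
  | cons a tl ih =>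
    refine ih _ ?_
    clear ih
    induction data generalizing s with
    | nil => exact hs
    | cons b tb ihd => exact ihd _ (PySem.Set.nodup_add _ _ hs)

theorem pv_countP_or_disjoint (p q : Int → Bool) (ds : List Int)
    (h : ∀ x, ¬(p x = true ∧ q x = true)) :
    ds.countP (fun x => p x || q x) = ds.countP p + ds.countP q := by
  induction ds with
  | nil => simp
  | cons d tl ih =>
    simp only [List.countP_cons, ih]
    by_cases hp : p d = true
    · have hq : q d = false := by
        cases hqq : q d
        · rfl
        · exact absurd ⟨hp, hqq⟩ (h d)
      simp [hp, hq]
      omega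
    · simp only [Bool.not_eq_true] at hp
      by_cases hq : q d = true <;> simp [hp, hq] <;> omega

theorem pv_countP_cons_pred (data tl : List Int) (a : Int) (h : a ∉ tl) :
    data.countP (fun x => decide (x ∈ a :: tl)) =
      data.count a + data.countP (fun x => decide (x ∈ tl)) := by
  have h1 : data.countP (fun x => decide (x ∈ a :: tl)) =
      data.countP (fun x => decide (x = a) || decide (x ∈ tl)) := by
    refine List.countP_congr ?_
    intro x _
    simp [List.mem_cons]
  rw [h1, pv_countP_or_disjoint _ _ data (by intro x; simp; rintro rfl; exact h)]
  congr 1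

-- sum of per-value counts over a nodup list = countP of membership
theorem pv_sum_counts (L data : List Int) (hL : L.Nodup) :
    ((L.map (fun i => (data.count i : Int))).sum) = (data.countP (fun x => decide (x ∈ L)) : Int) := by
  induction L with
  | nil => simp
  | cons a tl ih =>
    simp only [List.nodup_cons] at hL
    rw [List.map_cons, List.sum_cons, ih hL.2, pv_countP_cons_pred data tl a hL.1]
    push_cast
    ring

theorem pv_count_eq (data : List Int) (i c : Int) :
    data.foldl (fun counter j => if i = j then counter + 1 else counter) c = c + (data.count i : Int) := by
  rw [PySem.List.foldl_ite_add_one]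
  congr 1
  norm_cast
  rw [List.count]
  refine List.countP_congr ?_
  intro x _
  by_cases h : i = x
  · subst h; simp
  · simp [h, Ne.symm h]

-- the two membership predicates agree
theorem pv_pred_iff (data : List Int) (x : Int) :
    ((data.any (fun a => PySem.Set.contains (PySem.Set.ofList data) (x - a))) = true) ↔
      x ∈ pvSumset data := by
  rw [pvSumset, pv_mem_sumset]
  simp only [List.any_eq_true, PySem.Set.contains_iff, PySem.Set.mem_ofList, PySem.Set.empty,
    List.not_mem_nil, false_or]
  constructor
  · rintro ⟨a, ha, hb⟩
    exact ⟨a, ha, x - a, hb, by ring⟩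
  · rintro ⟨i, hi, j, hj, rfl⟩
    exact ⟨i, hi, by simpa using hj⟩

theorem pv_A_eq (data : List Int) :
    double_string data = (data.countP (fun x => decide (x ∈ pvSumset data)) : Int) := by
  have hnd : (pvSumset data).Nodup :=
    pv_nodup_sumset data data PySem.Set.empty (by simp [PySem.Set.empty])
  simp only [double_string]
  change (pvSumset data).foldl
      (fun counter i => data.foldl (fun counter j => if i = j then counter + 1 else counter) counter) 0 = _
  have h1 : List.foldl
        (fun counter i => data.foldl (fun counter j => if i = j then counter + 1 else counter) counter)
        0 (pvSumset data) =
      List.foldl (fun c i => c + (data.count i : Int)) 0 (pvSumset data) :=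
    PySem.List.foldl_congr_mem (pvSumset data) _ _ 0 (fun c i _ => pv_count_eq data i c)
  rw [h1, PySem.List.foldl_add, pv_sum_counts _ data hnd, zero_add]

theorem pv_B_eq (data : List Int) :
    double_string_alt data =
      (data.countP (fun x => data.any (fun a => PySem.Set.contains (PySem.Set.ofList data) (x - a))) : Int) := by
  simp only [double_string_alt]
  rw [PySem.List.foldl_if_add_one, zero_add]

-- ===== VERDICT (by name: the statement is the Claim_ definition above) =====
theorem double_string_spec : Claim_equal_double_string := by
  intro data _
  unfold Spec_double_string
  rw [pv_A_eq, pv_B_eq]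
  congr 1
  refine (List.countP_congr ?_).symm
  intro x _
  have h := pv_pred_iff data x
  by_cases hx : x ∈ pvSumset data
  · exact iff_of_true (h.mpr hx) (decide_eq_true hx)
  · exact iff_of_false (fun hh => hx (h.mp hh)) (by simp [hx])
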